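-- pv_equiv track=rewrite | github.com/fredrikwermeling/Greenlisted_v2 | generate_validation_index.py | detect_gene_id_column
-- ===== SOURCE A (Python) =====
-- def detect_gene_id_column(headers, symbol_col_idx, rna_col_idx):
--     """Try to find a Gene ID column from the headers."""
--     id_keywords = ["gene id", "gene_id", "target gene id", "annotated gene id"]
--     for i, h in enumerate(headers):
--         if h.strip().lower() in id_keywords and i != symbol_col_idx and i != rna_col_idx:
--             return i
--     # Fallback: for Brie/Brunello, column 0 is "Target Gene ID"
--     for i, h in enumerate(headers):
--         if "gene id" in h.strip().lower() and i != symbol_col_idx and i != rna_col_idx: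
--             return i
--     return None
-- ===== SOURCE B (Python) =====
-- def detect_gene_id_column(headers, symbol_col_idx, rna_col_idx):
--     """Single pass: return first exact keyword match immediately; remember the
--     first substring fallback and return it after the loop if no exact match."""
--     id_keywords = ["gene id", "gene_id", "target gene id", "annotated gene id"]
--     fallback = None
--     for i, h in enumerate(headers):
--         if i == symbol_col_idx or i == rna_col_idx:
--             continue
--         k = h.strip().lower()
--         if k in id_keywords:
--             return i
--         if fallback is None and "gene id" in k:
--             fallback = i
--     return fallback
-- ===== Notes on version B (the rewrite author's own statement) =====
-- stated objective: alternative
-- what changed: Replaces A's two full scans (exact-match scan, then substring fallback scan) with a single pass over enumerate(headers) that returns an exact match immediately and remembers the first substring match as a fallback returned after the loop.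
import Mathlib
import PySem

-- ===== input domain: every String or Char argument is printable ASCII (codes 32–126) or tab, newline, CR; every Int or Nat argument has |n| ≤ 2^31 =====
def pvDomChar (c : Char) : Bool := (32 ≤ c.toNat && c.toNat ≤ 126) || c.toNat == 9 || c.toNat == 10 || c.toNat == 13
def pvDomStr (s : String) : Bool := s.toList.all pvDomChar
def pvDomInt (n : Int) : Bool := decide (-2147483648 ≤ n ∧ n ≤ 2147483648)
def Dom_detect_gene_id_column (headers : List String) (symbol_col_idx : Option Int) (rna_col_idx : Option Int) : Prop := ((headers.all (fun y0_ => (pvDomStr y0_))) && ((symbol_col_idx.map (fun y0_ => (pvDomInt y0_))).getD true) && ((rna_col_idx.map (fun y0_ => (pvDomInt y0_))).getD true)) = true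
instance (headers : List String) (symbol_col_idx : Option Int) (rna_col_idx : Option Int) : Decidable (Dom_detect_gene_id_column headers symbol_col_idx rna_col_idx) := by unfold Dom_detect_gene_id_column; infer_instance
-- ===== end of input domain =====

-- B replaces A's two full scans with one pass that keeps a remembered substring fallback; same result, alternative decomposition.

-- ===== PORT A =====
def pvKey (h : String) : String := PySem.Str.lower (PySem.Str.strip h)

def pvIdKeywords : List String := ["gene id", "gene_id", "target gene id", "annotated gene id"]

-- 'i != symbol_col_idx and i != rna_col_idx' (int vs Optional[int] comparison; != None is always true)
def pvGuard (i : Int) (s r : Option Int) : Bool := !(some i == s) && !(some i == r)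

-- first loop of A: first exact keyword match
def pvScanExact (s r : Option Int) : List String → Int → Option Int
  | [], _ => none
  | h :: t, i =>
    if pvIdKeywords.contains (pvKey h) && pvGuard i s r then some i
    else pvScanExact s r t (i + 1)

-- second loop of A: first substring match
def pvScanSub (s r : Option Int) : List String → Int → Option Int
  | [], _ => none
  | h :: t, i =>
    if PySem.Str.isIn "gene id" (pvKey h) && pvGuard i s r then some i
    else pvScanSub s r t (i + 1)

def detect_gene_id_column (headers : List String) (symbol_col_idx : Option Int) (rna_col_idx : Option Int) : Option Int :=
  match pvScanExact symbol_col_idx rna_col_idx headers 0 with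
  | some i => some i
  | none => pvScanSub symbol_col_idx rna_col_idx headers 0

-- ===== PORT B =====
-- single pass carrying the remembered fallback
def pvScanOne (s r : Option Int) : List String → Int → Option Int → Option Int
  | [], _, fb => fb
  | h :: t, i, fb =>
    if !(pvGuard i s r) then pvScanOne s r t (i + 1) fb
    else
      let k := pvKey h
      if pvIdKeywords.contains k then some i
      else pvScanOne s r t (i + 1)
        (if fb.isNone && PySem.Str.isIn "gene id" k then some i else fb)

def detect_gene_id_column_alt (headers : List String) (symbol_col_idx : Option Int) (rna_col_idx : Option Int) : Option Int :=
  pvScanOne symbol_col_idx rna_col_idx headers 0 none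

-- ===== PRECONDITION & SPEC =====
def Spec_detect_gene_id_column (headers : List String) (symbol_col_idx : Option Int) (rna_col_idx : Option Int) (out : Option Int) : Prop := out = detect_gene_id_column_alt headers symbol_col_idx rna_col_idx
instance (headers : List String) (symbol_col_idx : Option Int) (rna_col_idx : Option Int) (out : Option Int) : Decidable (Spec_detect_gene_id_column headers symbol_col_idx rna_col_idx out) := by unfold Spec_detect_gene_id_column; infer_instance

-- ===== CLAIM (what is proved, stated in full; the proofs are below) =====
def Claim_equal_detect_gene_id_column : Prop := ∀ (headers : List String) (symbol_col_idx : Option Int) (rna_col_idx : Option Int), Dom_detect_gene_id_column headers symbol_col_idx rna_col_idx → Spec_detect_gene_id_column headers symbol_col_idx rna_col_idx (detect_gene_id_column headers symbol_col_idx rna_col_idx)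

-- ===== LEMMAS AND PROOFS =====

-- the one-pass scan equals: exact scan, else the carried fallback, else the substring scan
theorem pvScanOne_eq (s r : Option Int) (t : List String) :
    ∀ (i : Int) (fb : Option Int),
      pvScanOne s r t i fb = ((pvScanExact s r t i).or (fb.or (pvScanSub s r t i))) := by
  induction t with
  | nil => intro i fb; simp [pvScanOne, pvScanExact, pvScanSub]
  | cons h t ih =>
    intro i fb
    cases hg : pvGuard i s r <;>
      cases he : pvIdKeywords.contains (pvKey h) <;>
        cases hs : PySem.Str.isIn "gene id" (pvKey h) <;>
          cases fb <;>
            simp only [pvScanOne, pvScanExact, pvScanSub, hg, he, hs, ih,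
              Bool.and_true, Bool.and_false, Bool.not_true, Bool.not_false,
              Option.isNone_none, Option.isNone_some, if_true, if_false,
              Bool.false_eq_true] <;>
            cases hE : pvScanExact s r t (i + 1) <;>
              simp [Option.or]

-- ===== VERDICT (by name: the statement is the Claim_ definition above) =====
theorem detect_gene_id_column_spec : Claim_equal_detect_gene_id_column := by
  intro headers s r _
  unfold Spec_detect_gene_id_column detect_gene_id_column detect_gene_id_column_alt
  rw [pvScanOne_eq]
  cases hE : pvScanExact s r headers 0 <;> simp [Option.or]
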